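-- pv_equiv track=rewrite | github.com/choco9966/Algorithm-Master | programmers/코딩테스트 대비반/1주차/기능개발.py | solution
-- ===== SOURCE A (Python) =====
-- from collections import deque
--
-- def solution(progresses, speeds):
--     '''
--     deque으로 작성 (리스트에 비해 속도가 5~10배 빠름)
--     '''
--     answer = []
--
--     remain_day = deque()
--     # 작업이 완료되는 요일을 저장하는 곳
--     for i, j in zip(progresses, speeds):
--         remain_day.append(int((100 - i)/j))
--
--     # 작업 완료에서 하나를 추출하고 끝난 작업이 몇개인지 확인
--
--     while len(remain_day) > 0:
--         cnt = 1
--         start = remain_day.popleft()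
--         while len(remain_day) > 0:
--             if remain_day[0] <= start:
--                 cnt += 1
--                 remain_day.popleft()
--             else:
--                 break
--         answer.append(cnt)
--     return answer
-- ===== SOURCE B (Python) =====
-- def solution(progresses, speeds):
--     days = [int((100 - p) / s) for p, s in zip(progresses, speeds)]
--     if not days:
--         return []
--     answer = []
--     leader, cnt = days[0], 1
--     for d in days[1:]:
--         if d <= leader:
--             cnt += 1
--         else:
--             answer.append(cnt)
--             leader, cnt = d, 1
--     answer.append(cnt)
--     return answer
-- ===== Notes on version B (the rewrite author's own statement) =====
-- stated objective: simpler
-- what changed: Replaces the deque with its nested popleft loop by a single forward pass keeping a scalar running leader and counter, appending the count whenever a later day exceeds the leader.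
import Mathlib
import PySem

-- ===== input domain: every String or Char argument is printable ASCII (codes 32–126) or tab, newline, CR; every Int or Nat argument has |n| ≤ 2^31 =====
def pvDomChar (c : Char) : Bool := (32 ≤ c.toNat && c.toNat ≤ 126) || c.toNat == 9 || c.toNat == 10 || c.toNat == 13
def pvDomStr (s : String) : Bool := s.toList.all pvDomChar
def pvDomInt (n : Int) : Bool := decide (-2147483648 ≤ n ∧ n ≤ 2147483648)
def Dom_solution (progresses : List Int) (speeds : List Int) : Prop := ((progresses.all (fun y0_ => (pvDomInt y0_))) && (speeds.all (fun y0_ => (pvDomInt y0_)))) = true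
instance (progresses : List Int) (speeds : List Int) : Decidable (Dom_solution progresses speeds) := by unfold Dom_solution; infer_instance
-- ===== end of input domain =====

-- B replaces A's deque and nested popleft loop by one forward pass with a scalar
-- running leader and counter (objective: simpler); same return value on Pre_.

-- ===== PORT A =====
-- int((100 - i)/j): on Dom the operands are < 2^32, so the correctly rounded float
-- quotient truncates to the exact truncated quotient; ported as Int.tdiv (trunc toward 0).
def aDays (progresses : List Int) (speeds : List Int) : List Int :=
  (progresses.zip speeds).map (fun ij => Int.tdiv (100 - ij.1) ij.2)

-- inner while: pop heads ≤ start, counting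
def aInner (start : Int) (cnt : Int) : List Int → Int × List Int
  | [] => (cnt, [])
  | d :: rest => if d ≤ start then aInner start (cnt + 1) rest else (cnt, d :: rest)

theorem aInner_len (start cnt : Int) : ∀ l : List Int, (aInner start cnt l).2.length ≤ l.length := by
  intro l
  induction l generalizing cnt with
  | nil => simp [aInner]
  | cons d rest ih =>
    simp only [aInner]
    split
    · exact le_trans (ih _) (Nat.le_succ _)
    · simp

-- outer while: popleft start, run inner, append cnt
def aOuter : List Int → List Int
  | [] => []
  | start :: rest =>
    let p := aInner start 1 rest
    p.1 :: aOuter p.2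
termination_by l => l.length
decreasing_by
  exact Nat.lt_succ_of_le (aInner_len start 1 rest)

def solution (progresses : List Int) (speeds : List Int) : List Int :=
  aOuter (aDays progresses speeds)

-- ===== PORT B =====
-- the single forward pass over days[1:] with running leader/cnt and the answer accumulator
def bLoop (leader : Int) (cnt : Int) (answer : List Int) : List Int → List Int
  | [] => answer ++ [cnt]
  | d :: rest =>
    if d ≤ leader then bLoop leader (cnt + 1) answer rest
    else bLoop d 1 (answer ++ [cnt]) rest

def solution_alt (progresses : List Int) (speeds : List Int) : List Int :=
  -- days = [int((100 - p) / s) for p, s in zip(progresses, speeds)]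
  match (progresses.zip speeds).map (fun ps => Int.tdiv (100 - ps.1) ps.2) with
  | [] => []
  | d0 :: rest => bLoop d0 1 [] rest

-- ===== PRECONDITION & SPEC =====
-- Pre_ excludes exactly the inputs where zip pairs a progress with a zero speed:
-- there A (and B alike) raises ZeroDivisionError.
def Pre_solution (progresses : List Int) (speeds : List Int) : Prop :=
  ∀ p ∈ progresses.zip speeds, p.2 ≠ 0
instance (progresses : List Int) (speeds : List Int) : Decidable (Pre_solution progresses speeds) := by unfold Pre_solution; infer_instance

def pvWitness_solution : List Int × List Int := ([93, 30, 55], [1, 30, 5])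

def Spec_solution (progresses : List Int) (speeds : List Int) (out : List Int) : Prop := out = solution_alt progresses speeds
instance (progresses : List Int) (speeds : List Int) (out : List Int) : Decidable (Spec_solution progresses speeds out) := by unfold Spec_solution; infer_instance

-- ===== CLAIM (what is proved, stated in full; the proofs are below) =====
def Claim_equal_solution : Prop := ∀ (progresses : List Int) (speeds : List Int), Dom_solution progresses speeds → Pre_solution progresses speeds → Spec_solution progresses speeds (solution progresses speeds)

-- ===== LEMMAS AND PROOFS =====
theorem bLoop_eq (rest : List Int) : ∀ (leader cnt : Int) (acc : List Int),
    bLoop leader cnt acc rest = acc ++ ((aInner leader cnt rest).1 :: aOuter (aInner leader cnt rest).2) := by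
  induction rest with
  | nil => intro leader cnt acc; simp [bLoop, aInner, aOuter]
  | cons d rest ih =>
    intro leader cnt acc
    simp only [bLoop, aInner]
    split
    · exact ih leader (cnt + 1) acc
    · rw [ih d 1 (acc ++ [cnt])]
      simp [aOuter]

-- ===== VERDICT (by name: the statement is the Claim_ definition above) =====
theorem solution_spec : Claim_equal_solution := by
  intro progresses speeds _ _
  unfold Spec_solution solution solution_alt
  rw [show (progresses.zip speeds).map (fun ps => Int.tdiv (100 - ps.1) ps.2) = aDays progresses speeds from rfl]
  cases h : aDays progresses speeds with
  | nil => simp [aOuter]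
  | cons d0 rest =>
    show aOuter (d0 :: rest) = bLoop d0 1 [] rest
    rw [bLoop_eq rest d0 1 []]
    simp [aOuter]
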